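-- pv_equiv track=rewrite | github.com/wanghao9696/learning | Python/Python练习/test.py | riqi
-- ===== SOURCE A (Python) =====
-- def riqi(iList):
--     iLen = len(iList)
--     if iLen == 1:
--         return iList
--     res = [iList[0].split('-')[0]]
--     for i in range(iLen-1):
--         if iList[i+1].split('-')[0] > iList[i].split('-')[1]:
--             res.append(iList[i].split('-')[1])
--             res.append(iList[i+1].split('-')[0])
--     res.append(iList[-1].split('-')[1])
--
--     res2 = []
--     for i in range(0, len(res), 2):
--         res2.append(str(res[i]) + '-' + str(res[i+1]))
--     return res2
-- ===== SOURCE B (Python) =====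
-- def riqi(iList):
--     if len(iList) == 1:
--         return iList
--     cur = iList[0].split('-')[0]
--     out = []
--     for prev, nxt in zip(iList, iList[1:]):
--         if nxt.split('-')[0] > prev.split('-')[1]:
--             out.append(cur + '-' + prev.split('-')[1])
--             cur = nxt.split('-')[0]
--     out.append(cur + '-' + iList[-1].split('-')[1])
--     return out
-- ===== Notes on version B (the rewrite author's own statement) =====
-- stated objective: simpler
-- what changed: B does a single pass over consecutive pairs maintaining a running interval start and emitting merged 'start-end' strings directly, instead of A's two-phase construction of a flat boundary list followed by a second index loop that pairs the boundaries back into strings.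
import Mathlib
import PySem

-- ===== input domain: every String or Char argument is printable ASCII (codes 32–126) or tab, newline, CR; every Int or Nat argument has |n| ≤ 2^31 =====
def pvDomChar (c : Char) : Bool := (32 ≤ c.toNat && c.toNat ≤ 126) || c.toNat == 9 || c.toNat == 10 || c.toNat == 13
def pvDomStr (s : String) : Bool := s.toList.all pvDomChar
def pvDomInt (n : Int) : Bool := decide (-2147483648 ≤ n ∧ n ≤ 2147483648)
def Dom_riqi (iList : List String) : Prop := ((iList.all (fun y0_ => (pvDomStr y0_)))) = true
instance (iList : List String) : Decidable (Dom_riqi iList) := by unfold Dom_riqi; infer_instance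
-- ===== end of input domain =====

-- B merges the two phases of A (build a flat boundary list, then pair it up) into one pass
-- that keeps a running interval start; objective: simpler.

-- shared helper: s.split('-') (Python split with explicit separator; '-' ≠ '' so split? is some)
def pvSplit (s : String) : List String := (PySem.Str.split? s "-").getD []
-- s.split('-')[0] / s.split('-')[1] with a default ("" — only reached outside Pre_)
def pvStart (s : String) : String := (pvSplit s).getD 0 ""
def pvEnd (s : String) : String := (pvSplit s).getD 1 ""

-- ===== PORT A =====
def riqi (iList : List String) : List String :=
  if iList.length = 1 then iList
  else
    let iLen : Int := iList.length
    let res : List String := [pvStart (PySem.List.pyGetD iList 0 "")]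
    let res := (PySem.List.pyRange 0 (iLen - 1) 1).foldl
      (fun res i =>
        if pvEnd (PySem.List.pyGetD iList i "") < pvStart (PySem.List.pyGetD iList (i + 1) "")
        then res ++ [pvEnd (PySem.List.pyGetD iList i ""), pvStart (PySem.List.pyGetD iList (i + 1) "")]
        else res) res
    let res := res ++ [pvEnd (PySem.List.pyGetD iList (-1) "")]
    (PySem.List.pyRange 0 (res.length : Int) 2).foldl
      (fun res2 i =>
        res2 ++ [PySem.List.pyGetD res i "" ++ "-" ++ PySem.List.pyGetD res (i + 1) ""]) []

-- ===== PORT B =====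
def riqi_alt (iList : List String) : List String :=
  if iList.length = 1 then iList
  else
    match iList with
    | [] => []          -- unreachable under Pre_ (Python B raises IndexError on [])
    | x :: _ =>
      let q := (iList.zip iList.tail).foldl
        (fun (acc : String × List String) pr =>
          if pvEnd pr.1 < pvStart pr.2
          then (pvStart pr.2, acc.2 ++ [acc.1 ++ "-" ++ pvEnd pr.1])
          else acc)
        (pvStart x, [])
      q.2 ++ [q.1 ++ "-" ++ pvEnd (PySem.List.pyGetD iList (-1) "")]

-- ===== PRECONDITION & SPEC =====
-- Pre_ excludes exactly the inputs where A raises: the empty list (IndexError on iList[0]) and,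
-- when len ≥ 2, any element without '-' (IndexError on split('-')[1]).
def Pre_riqi (iList : List String) : Prop :=
  iList ≠ [] ∧ (iList.length ≠ 1 → ∀ s ∈ iList, 2 ≤ (pvSplit s).length)
instance (iList : List String) : Decidable (Pre_riqi iList) := by unfold Pre_riqi; infer_instance
def pvWitness_riqi : List String := ["1-3", "4-7", "8-9"]

def Spec_riqi (iList : List String) (out : List String) : Prop := out = riqi_alt iList
instance (iList : List String) (out : List String) : Decidable (Spec_riqi iList out) := by unfold Spec_riqi; infer_instance

-- ===== CLAIM (what is proved, stated in full; the proofs are below) =====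
def Claim_equal_riqi : Prop := ∀ (iList : List String), Dom_riqi iList → Pre_riqi iList → Spec_riqi iList (riqi iList)

-- ===== LEMMAS AND PROOFS =====

-- the gap emission of A's first loop, as a list-valued function of a consecutive pair
def pvGapOut (pr : String × String) : List String :=
  if pvEnd pr.1 < pvStart pr.2 then [pvEnd pr.1, pvStart pr.2] else []

-- A's second loop, structurally: pair up an (even-length) list into "a-b" strings
def pvPairUp : List String → List String
  | a :: b :: rest => (a ++ "-" ++ b) :: pvPairUp rest
  | _ => []

-- consecutive pairs as indexed accesses
lemma zip_tail_eq_map_range {α : Type} (xs : List α) (d : α) :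
    xs.zip xs.tail = (List.range (xs.length - 1)).map (fun k => (xs.getD k d, xs.getD (k + 1) d)) := by
  induction xs with
  | nil => simp
  | cons a ys ih =>
    cases ys with
    | nil => simp
    | cons b zs =>
      rw [show (a :: b :: zs).zip (a :: b :: zs).tail = (a, b) :: ((b :: zs).zip (b :: zs).tail) by simp]
      rw [ih]
      simp only [List.length_cons, Nat.add_sub_cancel, List.range_succ_eq_map, List.map_cons,
        List.map_map]
      refine List.cons_eq_cons.mpr ⟨by simp, ?_⟩
      apply List.map_congr_left
      intro k _
      simp

-- A's first loop produces the boundary list [s0] ++ flat gaps ++ [e]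
lemma even_flat (P : List (String × String)) : ∃ m, (P.flatMap pvGapOut).length = 2 * m := by
  induction P with
  | nil => exact ⟨0, rfl⟩
  | cons p P ih =>
    obtain ⟨m, hm⟩ := ih
    by_cases h : pvEnd p.1 < pvStart p.2
    · exact ⟨m + 1, by simp [pvGapOut, h, hm]; omega⟩
    · exact ⟨m, by simp [pvGapOut, h, hm]⟩

-- A's second loop equals pvPairUp on even-length lists
lemma pair_loop (m : Nat) : ∀ (res acc : List String), res.length = 2 * m →
    (List.range m).foldl
      (fun r2 k => r2 ++ [res.getD (2 * k) "" ++ "-" ++ res.getD (2 * k + 1) ""]) acc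
      = acc ++ pvPairUp res := by
  induction m with
  | zero =>
    intro res acc h
    match res, h with
    | [], _ => simp [pvPairUp]
  | succ m ih =>
    intro res acc h
    match res with
    | a :: b :: rest =>
      simp only [List.length_cons] at h
      have hrest : rest.length = 2 * m := by omega
      simp only [List.range_succ_eq_map, List.foldl_cons, List.foldl_map]
      calc (List.range m).foldl
            (fun r2 k => r2 ++ [(a :: b :: rest).getD (2 * (k + 1)) "" ++ "-" ++ (a :: b :: rest).getD (2 * (k + 1) + 1) ""])
            (acc ++ [(a :: b :: rest).getD 0 "" ++ "-" ++ (a :: b :: rest).getD 1 ""])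
          = (List.range m).foldl
            (fun r2 k => r2 ++ [rest.getD (2 * k) "" ++ "-" ++ rest.getD (2 * k + 1) ""])
            (acc ++ [a ++ "-" ++ b]) := by
            apply PySem.List.foldl_congr_mem
            intro r2 k _
            have h1 : 2 * (k + 1) = 2 * k + 1 + 1 := by omega
            rw [h1]
            simp only [List.getD_cons_succ]
        _ = (acc ++ [a ++ "-" ++ b]) ++ pvPairUp rest := ih rest _ hrest
        _ = acc ++ pvPairUp (a :: b :: rest) := by simp [pvPairUp]

-- pairing up the boundary list equals B's single pass
lemma pairUp_eq_bloop (P : List (String × String)) : ∀ (cur e : String) (out : List String),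
    (let q := P.foldl
        (fun (acc : String × List String) pr =>
          if pvEnd pr.1 < pvStart pr.2
          then (pvStart pr.2, acc.2 ++ [acc.1 ++ "-" ++ pvEnd pr.1])
          else acc) (cur, out)
     q.2 ++ [q.1 ++ "-" ++ e])
    = out ++ pvPairUp (cur :: (P.flatMap pvGapOut ++ [e])) := by
  induction P with
  | nil => intro cur e out; simp [pvPairUp]
  | cons pr P ih =>
    intro cur e out
    by_cases h : pvEnd pr.1 < pvStart pr.2
    · simp only [List.foldl_cons, List.flatMap_cons, pvGapOut, if_pos h]
      rw [ih (pvStart pr.2) e (out ++ [cur ++ "-" ++ pvEnd pr.1])]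
      simp [pvPairUp]
    · simp only [List.foldl_cons, List.flatMap_cons, pvGapOut, if_neg h]
      rw [ih cur e out]
      simp

-- A's first loop, converted from index form to the pair/flatMap form
lemma aloop_eq (xs : List String) (x : String) (rest : List String) (hxs : xs = x :: rest) :
    (List.range (xs.length - 1)).foldl
      (fun res (k : Nat) =>
        if pvEnd (PySem.List.pyGetD xs (k : Int) "") < pvStart (PySem.List.pyGetD xs ((k : Int) + 1) "")
        then res ++ [pvEnd (PySem.List.pyGetD xs (k : Int) ""), pvStart (PySem.List.pyGetD xs ((k : Int) + 1) "")]
        else res)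
      [pvStart (PySem.List.pyGetD xs 0 "")]
    = [pvStart x] ++ (xs.zip xs.tail).flatMap pvGapOut := by
  have hcongr := PySem.List.foldl_congr_mem (List.range (xs.length - 1))
    (fun res (k : Nat) =>
      if pvEnd (PySem.List.pyGetD xs (k : Int) "") < pvStart (PySem.List.pyGetD xs ((k : Int) + 1) "")
      then res ++ [pvEnd (PySem.List.pyGetD xs (k : Int) ""), pvStart (PySem.List.pyGetD xs ((k : Int) + 1) "")]
      else res)
    (fun res (k : Nat) => res ++ pvGapOut (xs.getD k "", xs.getD (k + 1) ""))
    [pvStart (PySem.List.pyGetD xs 0 "")]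
    (by
      intro res k _
      have hc : ((k : Int) + 1) = ((k + 1 : Nat) : Int) := by push_cast; ring
      simp only [hc, PySem.List.pyGetD_natCast, pvGapOut]
      split <;> simp)
  rw [hcongr,
    PySem.List.foldl_append_eq_flatMap (fun k => pvGapOut (xs.getD k "", xs.getD (k + 1) ""))]
  rw [zip_tail_eq_map_range xs "", List.flatMap_map]
  subst hxs
  simp [PySem.List.pyGetD_zero_cons]

-- ===== VERDICT (by name: the statement is the Claim_ definition above) =====
theorem riqi_spec : Claim_equal_riqi := by
  intro iList _ hpre
  unfold Spec_riqi
  obtain ⟨hne, -⟩ := hpre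
  by_cases h1 : iList.length = 1
  · simp [riqi, riqi_alt, h1]
  · obtain ⟨x, rest, rfl⟩ : ∃ x rest, iList = x :: rest := by
      cases iList with
      | nil => exact absurd rfl hne
      | cons a b => exact ⟨a, b, rfl⟩
    simp only [riqi, riqi_alt, if_neg h1]
    have hlen1 : (((x :: rest).length : Int) - 1) = (((x :: rest).length - 1 : Nat) : Int) := by
      simp
    rw [hlen1, PySem.List.pyRange_zero_nat, List.foldl_map, aloop_eq (x :: rest) x rest rfl]
    set e := pvEnd (PySem.List.pyGetD (x :: rest) (-1) "") with he
    set P := (x :: rest).zip (x :: rest).tail with hP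
    obtain ⟨m, hm⟩ := even_flat P
    set res : List String := [pvStart x] ++ P.flatMap pvGapOut ++ [e] with hres
    have hrlen : res.length = 2 * (m + 1) := by simp [hres, hm]; omega
    -- B side: single pass over P
    have hB := pairUp_eq_bloop P (pvStart x) e []
    simp only [] at hB
    rw [hB]
    -- A side: second loop over even indices
    have hcast : ((res.length : Int)) = ((2 * (m + 1) : Nat) : Int) := by rw [hrlen]
    rw [hcast, PySem.List.pyRange_of_pos 0 _ (by norm_num : (0:Int) < 2)]
    have hcnt : (if (0:Int) < ((2 * (m + 1) : Nat) : Int)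
        then ((((2 * (m + 1) : Nat) : Int) - 0 + 2 - 1) / 2).toNat else 0) = m + 1 := by
      rw [if_pos (by positivity)]
      push_cast
      omega
    rw [hcnt, List.foldl_map]
    have hA2 := PySem.List.foldl_congr_mem (List.range (m + 1))
      (fun res2 (k : Nat) =>
        res2 ++ [PySem.List.pyGetD res ((0:Int) + 2 * (k : Int)) "" ++ "-"
          ++ PySem.List.pyGetD res ((0:Int) + 2 * (k : Int) + 1) ""])
      (fun res2 (k : Nat) => res2 ++ [res.getD (2 * k) "" ++ "-" ++ res.getD (2 * k + 1) ""])
      []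
      (by
        intro res2 k _
        have hc1 : ((0:Int) + 2 * (k : Int)) = ((2 * k : Nat) : Int) := by push_cast; ring
        have hc2 : ((2 * k : Nat) : Int) + 1 = ((2 * k + 1 : Nat) : Int) := by push_cast; ring
        simp only [hc1, hc2, PySem.List.pyGetD_natCast])
    rw [hA2, pair_loop (m + 1) res [] hrlen]
    -- both sides are pvPairUp of the boundary list
    simp [hres]
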